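-- pv_equiv track=rewrite | github.com/dsmoz/mcp-writing-library | vendor/kbase/core/markdown_handler.py | insert_page_markers
-- ===== SOURCE A (Python) =====
-- from typing import Callable, Dict, List, Optional
--
-- def create_page_marker(page_number: int) -> str:
--     """
--     Create a page marker comment.
--
--     Args:
--         page_number: Page number to create marker for
--
--     Returns:
--         Page marker string
--
--     Example:
--         >>> create_page_marker(5)
--         '<!-- Page 5 -->'
--     """
--     return f"<!-- Page {page_number} -->"
--
-- def insert_page_markers(
--     content: str,
--     page_breaks: List[int],
-- ) -> str:
--     """
--     Insert page markers at specified character positions.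
--
--     Args:
--         content: Original content
--         page_breaks: List of character positions where pages start
--
--     Returns:
--         Content with page markers inserted
--
--     Example:
--         >>> content = "First page content. Second page content."
--         >>> insert_page_markers(content, [0, 20])
--         '<!-- Page 1 -->First page content. <!-- Page 2 -->Second page content.'
--     """
--     if not page_breaks:
--         return content
--
--     # Sort breaks in descending order to insert from end to start
--     # (so positions don't shift)
--     sorted_breaks = sorted(enumerate(page_breaks, 1), key=lambda x: x[1], reverse=True)
--
--     result = content
--     for page_num, position in sorted_breaks:
--         marker = create_page_marker(page_num)
--         result = result[:position] + marker + result[position:]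
--
--     return result
-- ===== SOURCE B (Python) =====
-- def insert_page_markers(content, page_breaks):
--     # Gap buffer: the text is kept as two chunk stacks around a cursor.  Breaks
--     # are processed in descending order, so each insertion seeks the cursor a
--     # short (amortized) distance, splits at most one chunk, and pushes the
--     # marker; the pieces are joined once at the end.
--     left, right = [content], []
--     cur = total = len(content)
--     for page_num, pos in sorted(enumerate(page_breaks, 1), key=lambda x: x[1], reverse=True):
--         cut = slice(pos).indices(total)[1]
--         while cur > cut:
--             ch = left.pop()
--             if cur - len(ch) >= cut:
--                 right.append(ch)
--                 cur -= len(ch)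
--             else:
--                 k = cut - (cur - len(ch))
--                 left.append(ch[:k])
--                 right.append(ch[k:])
--                 cur = cut
--         while cur < cut:
--             ch = right.pop()
--             if cur + len(ch) <= cut:
--                 left.append(ch)
--                 cur += len(ch)
--             else:
--                 k = cut - cur
--                 left.append(ch[:k])
--                 right.append(ch[k:])
--                 cur = cut
--         marker = f"<!-- Page {page_num} -->"
--         left.append(marker)
--         cur += len(marker)
--         total += len(marker)
--     return "".join(left) + "".join(reversed(right))
-- ===== Notes on version B (the rewrite author's own statement) =====
-- stated objective: faster
-- what changed: Instead of rebuilding the entire string with one slice-splice per break, B keeps the text in a gap buffer (two chunk stacks around a cursor), resolves each break with the standard library's slice.indices, seeks the cursor there splitting at most one chunk, and joins once at the end.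
import Mathlib
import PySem

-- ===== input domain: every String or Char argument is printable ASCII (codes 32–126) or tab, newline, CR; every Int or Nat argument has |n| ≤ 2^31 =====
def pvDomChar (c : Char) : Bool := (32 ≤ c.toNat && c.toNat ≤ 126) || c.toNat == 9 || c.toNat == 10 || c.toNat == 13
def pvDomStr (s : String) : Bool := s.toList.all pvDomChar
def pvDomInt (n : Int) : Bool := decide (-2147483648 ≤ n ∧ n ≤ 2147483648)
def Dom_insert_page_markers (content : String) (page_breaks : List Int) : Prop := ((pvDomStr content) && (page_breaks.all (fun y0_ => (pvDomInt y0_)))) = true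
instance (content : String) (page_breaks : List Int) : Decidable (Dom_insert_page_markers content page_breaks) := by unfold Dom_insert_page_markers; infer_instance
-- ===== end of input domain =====

-- B keeps the text in a gap buffer (two chunk stacks around a cursor), seeks the
-- cursor to each break (resolved by the stdlib slice.indices) splitting at most
-- one chunk, and joins once at the end, instead of rebuilding the whole string
-- per break.

-- ===== PORT A =====
-- helper create_page_marker (f"<!-- Page {page_number} -->"), shared verbatim by both Pythons
def create_page_marker (page_number : Int) : List Char :=
  "<!-- Page ".toList ++ PySem.Int.toChars page_number ++ " -->".toList

def insert_page_markers (content : String) (page_breaks : List Int) : String :=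
  if page_breaks = [] then content
  else
    let sorted_breaks := PySem.List.sorted (PySem.List.enumerate page_breaks 1) (fun x => x.2) true
    let result := sorted_breaks.foldl
      (fun (res : List Char) (pr : Int × Int) =>
        PySem.List.slice res none (some pr.2) ++ create_page_marker pr.1 ++ PySem.List.slice res (some pr.2) none)
      content.toList
    String.ofList result

-- ===== PORT B =====
-- B's chunk stacks carry the chunk nearest the cursor at the HEAD (Python's
-- list.append/pop work at the tail; head-first is the same stack).

-- first while loop of Source B: move the cursor left to offset cut (pops `left`;
-- the [] case is Python's unreachable IndexError branch — the loop just stops)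
def pvSeekL (left right : List (List Char)) (cur c : Int) :
    List (List Char) × List (List Char) × Int :=
  if cur > c then
    match left with
    | [] => ([], right, cur)
    | ch :: left' =>
      if cur - ch.length ≥ c then
        pvSeekL left' (ch :: right) (cur - ch.length) c
      else
        let k := c - (cur - ch.length)
        (PySem.List.slice ch none (some k) :: left', PySem.List.slice ch (some k) none :: right, c)
  else (left, right, cur)

-- second while loop of Source B: move the cursor right to offset cut (pops `right`)
def pvSeekR (left right : List (List Char)) (cur c : Int) :
    List (List Char) × List (List Char) × Int :=
  if cur < c then
    match right with
    | [] => (left, [], cur)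
    | ch :: right' =>
      if cur + ch.length ≤ c then
        pvSeekR (ch :: left) right' (cur + ch.length) c
      else
        let k := c - cur
        (PySem.List.slice ch none (some k) :: left, PySem.List.slice ch (some k) none :: right', c)
  else (left, right, cur)

-- `slice(pos).indices(total)[1]` resolves a slice stop bound against length
-- `total` — exactly PySem.List.clampIdx total pos.
def insert_page_markers_alt (content : String) (page_breaks : List Int) : String :=
  let st := (PySem.List.sorted (PySem.List.enumerate page_breaks 1) (fun x => x.2) true).foldl
    (fun (st : List (List Char) × List (List Char) × Int × Nat) (pr : Int × Int) =>
      let cut : Int := ((PySem.List.clampIdx st.2.2.2 pr.2 : Nat) : Int)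
      let s1 := pvSeekL st.1 st.2.1 st.2.2.1 cut
      let s2 := pvSeekR s1.1 s1.2.1 s1.2.2 cut
      let marker := create_page_marker pr.1
      (marker :: s2.1, s2.2.1, s2.2.2 + (marker.length : Int), st.2.2.2 + marker.length))
    ([content.toList], [], (content.toList.length : Int), content.toList.length)
  String.ofList (st.1.reverse.flatten ++ st.2.1.flatten)

-- ===== PRECONDITION & SPEC =====
def Spec_insert_page_markers (content : String) (page_breaks : List Int) (out : String) : Prop := out = insert_page_markers_alt content page_breaks
instance (content : String) (page_breaks : List Int) (out : String) : Decidable (Spec_insert_page_markers content page_breaks out) := by unfold Spec_insert_page_markers; infer_instance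

-- ===== CLAIM (what is proved, stated in full; the proofs are below) =====
def Claim_equal_insert_page_markers : Prop := ∀ (content : String) (page_breaks : List Int), Dom_insert_page_markers content page_breaks → Spec_insert_page_markers content page_breaks (insert_page_markers content page_breaks)

-- ===== LEMMAS AND PROOFS =====

-- A's splice step, named
def pvIns (res : List Char) (pr : Int × Int) : List Char :=
  PySem.List.slice res none (some pr.2) ++ create_page_marker pr.1 ++ PySem.List.slice res (some pr.2) none

-- B's fold step, named (definitionally the lambda in insert_page_markers_alt)
def pvStepB (st : List (List Char) × List (List Char) × Int × Nat) (pr : Int × Int) :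
    List (List Char) × List (List Char) × Int × Nat :=
  let cut : Int := ((PySem.List.clampIdx st.2.2.2 pr.2 : Nat) : Int)
  let s1 := pvSeekL st.1 st.2.1 st.2.2.1 cut
  let s2 := pvSeekR s1.1 s1.2.1 s1.2.2 cut
  let marker := create_page_marker pr.1
  (marker :: s2.1, s2.2.1, s2.2.2 + (marker.length : Int), st.2.2.2 + marker.length)

theorem pvSlice_none_some (xs : List Char) (b : Int) :
    PySem.List.slice xs none (some b) = xs.take (PySem.List.clampIdx xs.length b) := by
  simp [PySem.List.slice]

theorem pvSeekL_spec (left : List (List Char)) (right : List (List Char)) (cur c : Int)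
    (hcur : cur = (left.reverse.flatten.length : Int)) (h0 : 0 ≤ c) (hle : c ≤ cur) :
    pvSeekL left right cur c
      = (((pvSeekL left right cur c).1, (pvSeekL left right cur c).2.1, c))
    ∧ (pvSeekL left right cur c).1.reverse.flatten = left.reverse.flatten.take c.toNat
    ∧ (pvSeekL left right cur c).2.1.flatten
        = left.reverse.flatten.drop c.toNat ++ right.flatten := by
  induction left generalizing right cur with
  | nil =>
    have hcur0 : cur = 0 := by simpa using hcur
    have hc0 : c = 0 := by omega
    rw [pvSeekL]
    simp [hcur0, hc0]
  | cons ch left' ih =>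
    have hflat : (ch :: left').reverse.flatten = left'.reverse.flatten ++ ch := by
      simp
    by_cases hgt : cur > c
    · by_cases hchunk : cur - (ch.length : Int) ≥ c
      · have hunf : pvSeekL (ch :: left') right cur c
            = pvSeekL left' (ch :: right) (cur - ch.length) c := by
          rw [pvSeekL, if_pos hgt, if_pos hchunk]
        have hcur' : cur - (ch.length : Int) = (left'.reverse.flatten.length : Int) := by
          rw [hcur, hflat]; simp [List.length_append]; try omega
        have hres := ih (ch :: right) (cur - ch.length) hcur' hchunk
        rw [hunf]
        refine ⟨hres.1, ?_, ?_⟩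
        · rw [hres.2.1, hflat]
          have : c.toNat ≤ left'.reverse.flatten.length := by omega
          rw [List.take_append_of_le_length this]
        · rw [hres.2.2, hflat]
          have : c.toNat ≤ left'.reverse.flatten.length := by omega
          rw [List.drop_append_of_le_length this]
          simp
      · have hunf : pvSeekL (ch :: left') right cur c
            = (PySem.List.slice ch none (some (c - (cur - ch.length))) :: left',
               PySem.List.slice ch (some (c - (cur - ch.length))) none :: right, c) := by
          rw [pvSeekL, if_pos hgt, if_neg hchunk]
        have hk0 : 0 ≤ c - (cur - (ch.length : Int)) := by omega
        have hcc : cur = (left'.reverse.flatten.length : Int) + (ch.length : Int) := by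
          rw [hcur, hflat]; simp
        have hklen : (c - (cur - (ch.length : Int))).toNat = c.toNat - left'.reverse.flatten.length := by
          omega
        have hLlen : left'.reverse.flatten.length ≤ c.toNat := by omega
        rw [hunf]
        refine ⟨rfl, ?_, ?_⟩
        · simp only [List.reverse_cons, List.flatten_append, List.flatten_cons, List.flatten_nil,
            List.append_nil]
          rw [PySem.List.slice_to ch hk0, hklen,
              show c.toNat = left'.reverse.flatten.length + (c.toNat - left'.reverse.flatten.length) from by omega,
              List.take_append, List.take_of_length_le (Nat.le_add_right _ _), Nat.add_sub_cancel_left]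
        · simp only [List.flatten_cons, hflat]
          rw [PySem.List.slice_from ch hk0, hklen,
              show c.toNat = left'.reverse.flatten.length + (c.toNat - left'.reverse.flatten.length) from by omega,
              List.drop_append, List.drop_of_length_le (Nat.le_add_right _ _), Nat.add_sub_cancel_left]
          simp
    · have hceq : c = cur := by omega
      rw [pvSeekL, if_neg hgt]
      subst hceq
      refine ⟨rfl, ?_, ?_⟩
      · rw [List.take_of_length_le (by omega)]
      · rw [List.drop_of_length_le (by omega)]
        simp

theorem pvSeekR_spec (right : List (List Char)) (left : List (List Char)) (cur c : Int)
    (h0 : 0 ≤ cur) (hle : cur ≤ c) (hhi : c ≤ cur + (right.flatten.length : Int)) :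
    pvSeekR left right cur c
      = (((pvSeekR left right cur c).1, (pvSeekR left right cur c).2.1, c))
    ∧ (pvSeekR left right cur c).1.reverse.flatten
        = left.reverse.flatten ++ right.flatten.take (c - cur).toNat
    ∧ (pvSeekR left right cur c).2.1.flatten = right.flatten.drop (c - cur).toNat := by
  induction right generalizing left cur with
  | nil =>
    have hceq : c = cur := by simp at hhi; omega
    rw [pvSeekR]
    subst hceq
    simp
  | cons ch right' ih =>
    have hflat : (ch :: right').flatten = ch ++ right'.flatten := by simp
    by_cases hlt : cur < c
    · by_cases hchunk : cur + (ch.length : Int) ≤ c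
      · have hunf : pvSeekR left (ch :: right') cur c
            = pvSeekR (ch :: left) right' (cur + ch.length) c := by
          rw [pvSeekR, if_pos hlt, if_pos hchunk]
        have hhi' : c ≤ cur + (ch.length : Int) + (right'.flatten.length : Int) := by
          rw [hflat] at hhi
          simp only [List.length_append, Nat.cast_add] at hhi
          omega
        have hres := ih (ch :: left) (cur + ch.length) (by omega) hchunk hhi'
        have hsub : (c - cur).toNat = ch.length + (c - (cur + (ch.length : Int))).toNat := by omega
        rw [hunf]
        refine ⟨hres.1, ?_, ?_⟩
        · rw [hres.2.1, hflat, hsub, List.take_append, List.take_of_length_le (Nat.le_add_right _ _),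
              Nat.add_sub_cancel_left]
          simp [List.append_assoc]
        · rw [hres.2.2, hflat, hsub, List.drop_append, List.drop_of_length_le (Nat.le_add_right _ _),
              Nat.add_sub_cancel_left]
          simp
      · have hunf : pvSeekR left (ch :: right') cur c
            = (PySem.List.slice ch none (some (c - cur)) :: left,
               PySem.List.slice ch (some (c - cur)) none :: right', c) := by
          rw [pvSeekR, if_pos hlt, if_neg hchunk]
        have hk0 : 0 ≤ c - cur := by omega
        have hklt : (c - cur).toNat ≤ ch.length := by omega
        rw [hunf]
        refine ⟨rfl, ?_, ?_⟩
        · simp only [List.reverse_cons, List.flatten_append, List.flatten_cons, List.flatten_nil,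
            List.append_nil, hflat]
          rw [PySem.List.slice_to ch hk0, List.take_append_of_le_length hklt]
        · simp only [List.flatten_cons, hflat]
          rw [PySem.List.slice_from ch hk0, List.drop_append_of_le_length hklt]
    · have hceq : c = cur := by omega
      rw [pvSeekR, if_neg hlt]
      subst hceq
      simp

theorem pvSeekL_noop (l r : List (List Char)) (cur c : Int) (h : ¬ cur > c) :
    pvSeekL l r cur c = (l, r, cur) := by
  rw [pvSeekL.eq_def, if_neg h]

theorem pvSeekR_noop (l r : List (List Char)) (cur c : Int) (h : ¬ cur < c) :
    pvSeekR l r cur c = (l, r, cur) := by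
  rw [pvSeekR.eq_def, if_neg h]

-- one fold step preserves the gap-buffer invariant and performs A's splice
theorem pvStepB_spec (st : List (List Char) × List (List Char) × Int × Nat)
    (pr : Int × Int) (res : List Char)
    (h1 : st.1.reverse.flatten ++ st.2.1.flatten = res)
    (h2 : st.2.2.1 = (st.1.reverse.flatten.length : Int))
    (h3 : st.2.2.2 = res.length) :
    (pvStepB st pr).1.reverse.flatten ++ (pvStepB st pr).2.1.flatten = pvIns res pr
    ∧ (pvStepB st pr).2.2.1 = ((pvStepB st pr).1.reverse.flatten.length : Int)
    ∧ (pvStepB st pr).2.2.2 = (pvIns res pr).length := by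
  obtain ⟨left, right, cur, total⟩ := st
  simp only at h1 h2 h3
  subst h2 h3
  set cl := PySem.List.clampIdx res.length pr.2 with hcl
  have hclle : cl ≤ res.length := by
    simp [hcl, PySem.List.clampIdx]; split_ifs <;> omega
  have hsplit : res.take cl ++ create_page_marker pr.1 ++ res.drop cl = pvIns res pr := by
    rw [pvIns, pvSlice_none_some res pr.2, PySem.List.slice_some_none res pr.2, ← hcl]
  by_cases hside : ((cl : Nat) : Int) ≤ (left.reverse.flatten.length : Int)
  · -- cursor moves left (or stays): pvSeekL does the work, pvSeekR is a no-op
    have hsL := pvSeekL_spec left right (left.reverse.flatten.length : Int) ((cl : Nat) : Int)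
      rfl (by positivity) hside
    simp only [pvStepB]
    rw [hsL.1]
    rw [pvSeekR_noop _ _ _ _ (by rw [← hcl]; simp)]
    simp only [List.reverse_cons, List.flatten_append, List.flatten_cons, List.flatten_nil,
      List.append_nil, List.length_append]
    have htk : ((cl : Nat) : Int).toNat = cl := by simp
    refine ⟨?_, ?_, ?_⟩
    · rw [hsL.2.1, hsL.2.2, htk, ← hsplit, ← h1]
      have hcle : cl ≤ left.reverse.flatten.length := by exact_mod_cast hside
      rw [List.take_append_of_le_length hcle, List.drop_append_of_le_length hcle]
    · rw [hsL.2.1, htk]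
      have hcle : cl ≤ left.reverse.flatten.length := by exact_mod_cast hside
      push_cast [List.length_take]
      try omega
    · rw [← hsplit]
      simp [List.length_append, List.length_take, List.length_drop]
      omega
  · -- cursor moves right: pvSeekL is a no-op, pvSeekR does the work
    replace hside := lt_of_not_ge hside
    have hrlen : cl ≤ left.reverse.flatten.length + right.flatten.length := by
      have : left.reverse.flatten.length + right.flatten.length = res.length := by
        rw [← h1]; simp
      omega
    have hsR := pvSeekR_spec right left (left.reverse.flatten.length : Int) ((cl : Nat) : Int)
      (by positivity) (by omega) (by omega)
    simp only [pvStepB]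
    rw [pvSeekL_noop _ _ _ _ (by rw [← hcl]; omega)]
    simp only
    rw [hsR.1]
    simp only [List.reverse_cons, List.flatten_append, List.flatten_cons, List.flatten_nil,
      List.append_nil, List.length_append]
    have htk : (((cl : Nat) : Int) - (left.reverse.flatten.length : Int)).toNat
        = cl - left.reverse.flatten.length := by omega
    refine ⟨?_, ?_, ?_⟩
    · have htake : (left.reverse.flatten ++ right.flatten).take cl
          = left.reverse.flatten ++ right.flatten.take (cl - left.reverse.flatten.length) := by
        conv_lhs => rw [show cl = left.reverse.flatten.length + (cl - left.reverse.flatten.length) from by omega]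
        rw [List.take_append, List.take_of_length_le (Nat.le_add_right _ _)]
        congr 2
        omega
      have hdrop : (left.reverse.flatten ++ right.flatten).drop cl
          = right.flatten.drop (cl - left.reverse.flatten.length) := by
        conv_lhs => rw [show cl = left.reverse.flatten.length + (cl - left.reverse.flatten.length) from by omega]
        rw [List.drop_append, List.drop_of_length_le (Nat.le_add_right _ _)]
        simp only [List.nil_append]
        congr 2
        omega
      rw [hsR.2.1, hsR.2.2, htk, ← hsplit, ← h1, htake, hdrop]
    · rw [hsR.2.1, htk]
      push_cast [List.length_append, List.length_take]
      try omega
    · rw [← hsplit]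
      simp [List.length_append, List.length_take, List.length_drop]
      omega

theorem pvFold_inv (L : List (Int × Int)) (res : List Char)
    (st : List (List Char) × List (List Char) × Int × Nat)
    (h1 : st.1.reverse.flatten ++ st.2.1.flatten = res)
    (h2 : st.2.2.1 = (st.1.reverse.flatten.length : Int))
    (h3 : st.2.2.2 = res.length) :
    (L.foldl pvStepB st).1.reverse.flatten ++ (L.foldl pvStepB st).2.1.flatten
      = L.foldl pvIns res := by
  induction L generalizing res st with
  | nil => simpa using h1
  | cons pr t ih =>
    have hs := pvStepB_spec st pr res h1 h2 h3
    rw [List.foldl_cons, List.foldl_cons]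
    exact ih (pvIns res pr) (pvStepB st pr) hs.1 hs.2.1 hs.2.2

-- ===== VERDICT (by name: the statement is the Claim_ definition above) =====
theorem insert_page_markers_spec : Claim_equal_insert_page_markers := by
  intro content page_breaks _hdom
  simp only [Spec_insert_page_markers, insert_page_markers, insert_page_markers_alt]
  set cs := content.toList with hcs
  set L := PySem.List.sorted (PySem.List.enumerate page_breaks 1) (fun x => x.2) true with hL
  rw [show (fun (st : List (List Char) × List (List Char) × Int × Nat) (pr : Int × Int) =>
      let cut : Int := ((PySem.List.clampIdx st.2.2.2 pr.2 : Nat) : Int)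
      let s1 := pvSeekL st.1 st.2.1 st.2.2.1 cut
      let s2 := pvSeekR s1.1 s1.2.1 s1.2.2 cut
      let marker := create_page_marker pr.1
      (marker :: s2.1, s2.2.1, s2.2.2 + (marker.length : Int), st.2.2.2 + marker.length))
      = pvStepB from rfl]
  have hinv := pvFold_inv L cs ([cs], [], (cs.length : Int), cs.length)
    (by simp) (by simp) rfl
  by_cases hnil : page_breaks = []
  · subst hnil
    have hLnil : L = [] := by rw [hL]; rfl
    rw [hLnil] at hinv ⊢
    simp only [List.foldl_nil] at hinv ⊢
    rw [hinv, hcs]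
    simp
  · simp only [if_neg hnil]
    rw [show (fun (res : List Char) (pr : Int × Int) =>
        PySem.List.slice res none (some pr.2) ++ create_page_marker pr.1 ++ PySem.List.slice res (some pr.2) none) = pvIns from rfl]
    rw [hinv]
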